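-- pv_equiv track=rewrite | github.com/kostaskaragiorgos/MPS-PARSER | mps_to_array/parallel_approach/python/rows.py | getRows
-- ===== SOURCE A (Python) =====
-- def getRows(list):
--     """ saves the rows to a list
--     input: list
--     return list
--     """
--     rows = []
--     for i in list:
--         if (i[0:7] != "COLUMNS") and  (i[0:4] != "ROWS" and i[0:4] != "NAME"):
--             rows.append(i)
--         if i[0:7] == "COLUMNS":
--             break
--     return rows
-- ===== SOURCE B (Python) =====
-- def getRows(list):
--     """ saves the rows to a list
--     input: list
--     return list
--     """
--     cut = next((k for k, i in enumerate(list) if i[0:7] == "COLUMNS"), len(list))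
--     return [i for i in list[:cut] if i[0:4] != "ROWS" and i[0:4] != "NAME"]
-- ===== Notes on version B (the rewrite author's own statement) =====
-- stated objective: idiomatic
-- what changed: Replaces the single accumulate-and-break loop by two phases: first locate the index of the first 'COLUMNS' line, then filter the prefix before it with a list comprehension.
import Mathlib
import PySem

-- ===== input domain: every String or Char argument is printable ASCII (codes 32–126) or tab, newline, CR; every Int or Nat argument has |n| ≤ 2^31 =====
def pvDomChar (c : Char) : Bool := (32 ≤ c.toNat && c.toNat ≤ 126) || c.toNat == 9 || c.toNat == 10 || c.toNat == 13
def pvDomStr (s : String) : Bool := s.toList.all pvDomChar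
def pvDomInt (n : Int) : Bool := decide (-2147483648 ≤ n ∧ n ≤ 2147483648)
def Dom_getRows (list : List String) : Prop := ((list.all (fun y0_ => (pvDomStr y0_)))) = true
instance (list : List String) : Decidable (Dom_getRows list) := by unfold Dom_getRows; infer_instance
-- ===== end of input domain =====

-- B replaces A's accumulate-and-break loop by two phases (find the 'COLUMNS' cut index, then filter the prefix); same cost, more idiomatic.

-- ===== PORT A =====
-- loop 'for i in list: … break' with accumulator rows
def getRowsGoA : List String → List String → List String
  | [], rows => rows
  | i :: rest, rows =>
    let rows' := if PySem.Str.slice i (some 0) (some 7) ≠ "COLUMNS" ∧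
                    (PySem.Str.slice i (some 0) (some 4) ≠ "ROWS" ∧ PySem.Str.slice i (some 0) (some 4) ≠ "NAME")
                 then rows ++ [i] else rows
    if PySem.Str.slice i (some 0) (some 7) = "COLUMNS" then rows' else getRowsGoA rest rows'

def getRows (list : List String) : List String := getRowsGoA list []

-- ===== PORT B =====
def getRows_alt (list : List String) : List String :=
  let cut : Nat := match list.findIdx? (fun i => PySem.Str.slice i (some 0) (some 7) == "COLUMNS") with
                   | some k => k
                   | none => list.length
  (list.take cut).filter
    (fun i => PySem.Str.slice i (some 0) (some 4) != "ROWS" && PySem.Str.slice i (some 0) (some 4) != "NAME")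

-- ===== PRECONDITION & SPEC =====
def Spec_getRows (list : List String) (out : List String) : Prop := out = getRows_alt list
instance (list : List String) (out : List String) : Decidable (Spec_getRows list out) := by unfold Spec_getRows; infer_instance

-- ===== CLAIM (what is proved, stated in full; the proofs are below) =====
def Claim_equal_getRows : Prop := ∀ (list : List String), Dom_getRows list → Spec_getRows list (getRows list)

-- ===== LEMMAS AND PROOFS =====
theorem getRowsGoA_eq_alt (xs : List String) : ∀ acc, getRowsGoA xs acc = acc ++ getRows_alt xs := by
  induction xs with
  | nil => intro acc; simp [getRowsGoA, getRows_alt]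
  | cons i rest ih =>
    intro acc
    by_cases hc : PySem.Str.slice i (some 0) (some 7) = "COLUMNS"
    · simp [getRowsGoA, getRows_alt, List.findIdx?_cons, hc]
    · have halt : getRows_alt (i :: rest) =
          (if PySem.Str.slice i (some 0) (some 4) ≠ "ROWS" ∧ PySem.Str.slice i (some 0) (some 4) ≠ "NAME"
           then [i] else []) ++ getRows_alt rest := by
        simp only [getRows_alt, List.findIdx?_cons, beq_iff_eq, hc, if_false]
        cases h : rest.findIdx? (fun i => PySem.Str.slice i (some 0) (some 7) == "COLUMNS") with
        | some k =>
          simp only [Option.map_some, List.take_succ_cons, List.filter_cons, h]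
          split_ifs with h1 <;> simp_all
        | none =>
          simp only [Option.map_none, List.length_cons, List.take_succ_cons, List.take_length,
            List.filter_cons]
          split_ifs with h1 <;> simp_all
      simp only [getRowsGoA, hc, if_false, halt]
      rw [ih]
      split_ifs with h1 <;> simp_all
-- ===== VERDICT (by name: the statement is the Claim_ definition above) =====
theorem getRows_spec : Claim_equal_getRows := by
  intro list _
  unfold Spec_getRows getRows
  simpa using getRowsGoA_eq_alt list []
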